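-- pv_equiv track=rewrite | github.com/410-dev/AquariusOS | tools/makeroot.py | map_package_name
-- ===== SOURCE A (Python) =====
-- from typing import Dict, Optional, Set, List, Tuple
--
-- def match_pattern(pattern: str, name: str) -> bool:
--     """
--     Implement simple wildcard semantics:
--         '*abc*'  -> contains 'abc'
--         '*abc'   -> endswith 'abc'
--         'abc*'   -> startswith 'abc'
--         '*'      -> everything
--     No escaping, no complex globbing.
--     """
--     if pattern == "*":
--         return True
--
--     if "*" not in pattern:
--         return pattern == name
--
--     if pattern.startswith("*") and pattern.endswith("*"):
--         needle = pattern[1:-1]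
--         return needle in name
--
--     if pattern.startswith("*"):
--         needle = pattern[1:]
--         return name.endswith(needle)
--
--     if pattern.endswith("*"):
--         needle = pattern[:-1]
--         return name.startswith(needle)
--
--     # Fallback – treat as exact if malformed
--     return pattern == name
--
-- def map_package_name(pkg: str, mapping: Dict[str, str]) -> Optional[str]:
--     """
--     Map apt package name to RPM name using 'packages-mapping'.
--
--     Precedence:
--       1. Exact key match without wildcard.
--       2. First wildcard rule that matches.
--       3. If nothing matches, return original pkg name.
--
--     If mapped value is "_", return None (skip).
--     """
--     exact_matches: Dict[str, str] = {}
--     wildcard_rules: List[Tuple[str, str]] = []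
--
--     for k, v in mapping.items():
--         if "*" in k:
--             wildcard_rules.append((k, v))
--         else:
--             exact_matches[k] = v
--
--     # Exact match
--     if pkg in exact_matches:
--         val = exact_matches[pkg]
--         if val == "_":
--             return None
--         return val
--
--     # Wildcard matches (first match wins)
--     for pattern, val in wildcard_rules:
--         if match_pattern(pattern, pkg):
--             if val == "_":
--                 return None
--             return val
--
--     # Fallback: no mapping → keep original name
--     return pkg
-- ===== SOURCE B (Python) =====
-- def match_pattern(pattern: str, name: str) -> bool:
--     if pattern == "*":
--         return True
--     if "*" not in pattern:
--         return pattern == name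
--     if pattern.startswith("*") and pattern.endswith("*"):
--         return pattern[1:-1] in name
--     if pattern.startswith("*"):
--         return name.endswith(pattern[1:])
--     if pattern.endswith("*"):
--         return name.startswith(pattern[:-1])
--     return pattern == name
--
--
-- def map_package_name(pkg, mapping):
--     # Single pass: exact keys are unique in a dict, so a matching exact key
--     # wins immediately; remember only the first matching wildcard rule.
--     wild = None
--     for k, v in mapping.items():
--         if "*" not in k:
--             if k == pkg:
--                 return None if v == "_" else v
--         elif wild is None and match_pattern(k, pkg):
--             wild = v
--     if wild is not None:
--         return None if wild == "_" else wild
--     return pkg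
-- ===== Notes on version B (the rewrite author's own statement) =====
-- stated objective: simpler
-- what changed: Instead of first building an exact-match dict plus a wildcard-rule list and then scanning each, B makes one pass over the items, returning immediately on an exact key match and remembering only the first matching wildcard rule.
import Mathlib
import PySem

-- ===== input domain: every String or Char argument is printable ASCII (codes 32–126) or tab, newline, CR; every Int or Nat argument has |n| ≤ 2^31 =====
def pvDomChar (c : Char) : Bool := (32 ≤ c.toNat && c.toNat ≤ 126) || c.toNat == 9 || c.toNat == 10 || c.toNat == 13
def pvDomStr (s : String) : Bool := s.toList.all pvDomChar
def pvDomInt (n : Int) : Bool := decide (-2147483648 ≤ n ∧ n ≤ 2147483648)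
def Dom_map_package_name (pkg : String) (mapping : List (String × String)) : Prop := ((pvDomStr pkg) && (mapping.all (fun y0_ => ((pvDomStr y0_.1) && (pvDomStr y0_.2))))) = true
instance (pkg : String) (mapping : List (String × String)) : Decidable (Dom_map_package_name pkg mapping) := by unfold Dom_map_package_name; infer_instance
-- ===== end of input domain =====

-- B replaces A's two auxiliary containers and multi-pass structure by one pass over the
-- items that returns on an exact match and remembers the first matching wildcard rule
-- (objective: simpler; same O(n) cost).

-- ===== PORT A =====
-- shared helper (identical in Source A and Source B)
def match_pattern (pattern : String) (name : String) : Bool :=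
  if pattern = "*" then true
  else if ¬ PySem.Str.isIn "*" pattern then pattern = name
  else if PySem.Str.startswith pattern "*" && PySem.Str.endswith pattern "*" then
    PySem.Str.isIn (PySem.Str.slice pattern (some 1) (some (-1))) name
  else if PySem.Str.startswith pattern "*" then
    PySem.Str.endswith name (PySem.Str.slice pattern (some 1) none)
  else if PySem.Str.endswith pattern "*" then
    PySem.Str.startswith name (PySem.Str.slice pattern none (some (-1)))
  else pattern = name

-- the classifying for-loop of A: builds exact_matches (a dict) and wildcard_rules (a list)
def mpnBuild : List (String × String) → PySem.Dict String String → List (String × String) →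
    PySem.Dict String String × List (String × String)
  | [], ex, wr => (ex, wr)
  | (k, v) :: t, ex, wr =>
    if PySem.Str.isIn "*" k then mpnBuild t ex (wr ++ [(k, v)])
    else mpnBuild t (ex.insert k v) wr

-- A's wildcard for-loop: some result when a rule matched and the loop returned, none otherwise
def mpnWildFind : List (String × String) → String → Option (Option String)
  | [], _ => none
  | (p, v) :: t, pkg =>
    if match_pattern p pkg then some (if v = "_" then none else some v)
    else mpnWildFind t pkg

def map_package_name (pkg : String) (mapping : List (String × String)) : Option String :=
  match mpnBuild mapping PySem.Dict.empty [] with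
  | (exact_matches, wildcard_rules) =>
    match exact_matches.get? pkg with
    | some val => if val = "_" then none else some val
    | none =>
      match mpnWildFind wildcard_rules pkg with
      | some res => res
      | none => some pkg

-- ===== PORT B =====
-- Source B's single loop, carrying the first matching wildcard value (wild)
def mpnLoopB (pkg : String) : List (String × String) → Option String → Option String
  | [], wild =>
    match wild with
    | some w => if w = "_" then none else some w
    | none => some pkg
  | (k, v) :: t, wild =>
    if ¬ PySem.Str.isIn "*" k then
      if k = pkg then (if v = "_" then none else some v) else mpnLoopB pkg t wild
    else if wild = none ∧ match_pattern k pkg then mpnLoopB pkg t (some v)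
    else mpnLoopB pkg t wild

def map_package_name_alt (pkg : String) (mapping : List (String × String)) : Option String :=
  mpnLoopB pkg mapping none

-- ===== PRECONDITION & SPEC =====
-- Pre_ excludes association lists with duplicate keys, which cannot arise from a Python
-- dict; on them A's dict overwrite (last value wins) and B's immediate first-match return
-- are both representation accidents.
def Pre_map_package_name (pkg : String) (mapping : List (String × String)) : Prop :=
  (mapping.map Prod.fst).Nodup
instance (pkg : String) (mapping : List (String × String)) : Decidable (Pre_map_package_name pkg mapping) := by unfold Pre_map_package_name; infer_instance

def pvWitness_map_package_name : String × (List (String × String)) :=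
  ("a", [("a", "b"), ("c*", "_")])

def Spec_map_package_name (pkg : String) (mapping : List (String × String)) (out : Option String) : Prop := out = map_package_name_alt pkg mapping
instance (pkg : String) (mapping : List (String × String)) (out : Option String) : Decidable (Spec_map_package_name pkg mapping out) := by unfold Spec_map_package_name; infer_instance

-- ===== CLAIM (what is proved, stated in full; the proofs are below) =====
def Claim_equal_map_package_name : Prop := ∀ (pkg : String) (mapping : List (String × String)), Dom_map_package_name pkg mapping → Pre_map_package_name pkg mapping → Spec_map_package_name pkg mapping (map_package_name pkg mapping)

-- ===== LEMMAS AND PROOFS =====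

-- A's finish code, as a function of the pair built by mpnBuild
def mpnFin (pkg : String) (p : PySem.Dict String String × List (String × String)) : Option String :=
  match p.1.get? pkg with
  | some val => if val = "_" then none else some val
  | none =>
    match mpnWildFind p.2 pkg with
    | some res => res
    | none => some pkg

theorem map_package_name_eq_fin (pkg : String) (mapping : List (String × String)) :
    map_package_name pkg mapping = mpnFin pkg (mpnBuild mapping PySem.Dict.empty []) := by
  unfold map_package_name mpnFin
  obtain ⟨ex, wr⟩ := mpnBuild mapping PySem.Dict.empty []
  rfl

-- first matching wildcard value of a rule list
def fw (pkg : String) : List (String × String) → Option String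
  | [] => none
  | (k, v) :: t => if match_pattern k pkg then some v else fw pkg t

theorem mpnWildFind_eq_fw (pkg : String) (wr : List (String × String)) :
    mpnWildFind wr pkg = (fw pkg wr).map (fun v => if v = "_" then none else some v) := by
  induction wr with
  | nil => rfl
  | cons h t ih =>
    obtain ⟨k, v⟩ := h
    by_cases hm : match_pattern k pkg = true <;> simp [mpnWildFind, fw, hm, ih]

theorem fw_append (pkg k v : String) (wr : List (String × String)) :
    fw pkg (wr ++ [(k, v)]) =
      if fw pkg wr = none ∧ match_pattern k pkg = true then some v else fw pkg wr := by
  induction wr with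
  | nil => simp [fw]
  | cons h t ih =>
    obtain ⟨k', v'⟩ := h
    by_cases hm : match_pattern k' pkg = true <;> simp [fw, hm, ih]

-- once the exact dict holds pkg and no later exact key is pkg, A's answer is fixed
theorem mpnFin_found (pkg val : String) (t : List (String × String))
    (ex : PySem.Dict String String) (wr : List (String × String))
    (hget : ex.get? pkg = some val) (hnot : pkg ∉ t.map Prod.fst) :
    mpnFin pkg (mpnBuild t ex wr) = (if val = "_" then none else some val) := by
  induction t generalizing ex wr with
  | nil => simp [mpnBuild, mpnFin, hget]
  | cons h t ih =>
    obtain ⟨k, v⟩ := h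
    simp only [List.map_cons, List.mem_cons, not_or] at hnot
    by_cases hw : PySem.Str.isIn "*" k = true
    · rw [mpnBuild, if_pos hw]
      exact ih ex (wr ++ [(k, v)]) hget hnot.2
    · rw [mpnBuild, if_neg hw]
      refine ih (ex.insert k v) wr ?_ hnot.2
      rw [PySem.Dict.get?_insert_of_ne _ _ hnot.1, hget]

-- main invariant: while pkg is not (yet) an exact key, A's remaining work equals
-- B's loop started at the first wildcard match of the rules collected so far
theorem mpn_invariant (pkg : String) (t : List (String × String))
    (ex : PySem.Dict String String) (wr : List (String × String))
    (hget : ex.get? pkg = none) (hnd : (t.map Prod.fst).Nodup) :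
    mpnFin pkg (mpnBuild t ex wr) = mpnLoopB pkg t (fw pkg wr) := by
  induction t generalizing ex wr with
  | nil =>
    simp only [mpnBuild, mpnFin, hget, mpnLoopB, mpnWildFind_eq_fw]
    cases fw pkg wr <;> rfl
  | cons h t ih =>
    obtain ⟨k, v⟩ := h
    simp only [List.map_cons, List.nodup_cons] at hnd
    by_cases hw : PySem.Str.isIn "*" k = true
    · -- wildcard key
      rw [mpnBuild, if_pos hw, mpnLoopB, if_neg (not_not_intro hw),
        ih ex (wr ++ [(k, v)]) hget hnd.2, fw_append]
      by_cases hfw : fw pkg wr = none ∧ match_pattern k pkg = true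
      · rw [if_pos hfw, if_pos hfw]
      · rw [if_neg hfw, if_neg hfw]
    · rw [mpnBuild, if_neg hw, mpnLoopB, if_pos hw]
      by_cases hk : k = pkg
      · -- exact key equal to pkg
        subst hk
        rw [if_pos rfl]
        exact mpnFin_found k v t (ex.insert k v) wr
          (PySem.Dict.get?_insert_self ex k v) hnd.1
      · -- exact key, different
        rw [if_neg hk]
        refine ih (ex.insert k v) wr ?_ hnd.2
        rw [PySem.Dict.get?_insert_of_ne _ _ (Ne.symm hk), hget]

-- ===== VERDICT (by name: the statement is the Claim_ definition above) =====
theorem map_package_name_spec : Claim_equal_map_package_name := by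
  intro pkg mapping _ hpre
  unfold Spec_map_package_name map_package_name_alt
  rw [map_package_name_eq_fin]
  exact mpn_invariant pkg mapping PySem.Dict.empty [] (PySem.Dict.get?_empty pkg) hpre
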